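-- pv_equiv track=rewrite | github.com/seanahrens/unarxiv | texreader-web/modal_worker/tex_to_audio.py | _skip_bracketed_group
-- ===== SOURCE A (Python) =====
-- def _skip_bracketed_group(text: str, pos: int) -> int:
--     """Advance past an optional ``[...]`` group starting at *pos*.
--
--     Returns the index just after the closing ``]``.  If *pos* does not point
--     at ``[``, returns *pos* unchanged.
--     """
--     if pos >= len(text) or text[pos] != "[":
--         return pos
--     depth = 1
--     i = pos + 1
--     while i < len(text) and depth:
--         if text[i] == "[":
--             depth += 1
--         elif text[i] == "]":
--             depth -= 1
--         i += 1
--     return i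
-- ===== SOURCE B (Python) =====
-- def _skip_bracketed_group(text: str, pos: int) -> int:
--     if pos >= len(text) or text[pos] != "[":
--         return pos
--     depth = 1
--     cur = pos + 1
--     while depth:
--         close = text.find("]", cur)
--         if close == -1:
--             return len(text)
--         opener = text.find("[", cur)
--         if opener != -1 and opener < close:
--             depth += 1
--             cur = opener + 1
--         else:
--             depth -= 1
--             cur = close + 1
--     return cur
-- ===== Notes on version B (the rewrite author's own statement) =====
-- stated objective: idiomatic
-- what changed: B replaces A's per-character scan with str.find jumps: from the cursor it locates the next ']' and the next '[', returns len(text) when no ']' remains, and otherwise hops directly past the nearer bracket while keeping the depth counter.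
-- outside the precondition, e.g. on _skip_bracketed_group('[]x', -3): A returns -1, B returns 2; on _skip_bracketed_group('[]', -2): A returns 0, B returns 2
import Mathlib
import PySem

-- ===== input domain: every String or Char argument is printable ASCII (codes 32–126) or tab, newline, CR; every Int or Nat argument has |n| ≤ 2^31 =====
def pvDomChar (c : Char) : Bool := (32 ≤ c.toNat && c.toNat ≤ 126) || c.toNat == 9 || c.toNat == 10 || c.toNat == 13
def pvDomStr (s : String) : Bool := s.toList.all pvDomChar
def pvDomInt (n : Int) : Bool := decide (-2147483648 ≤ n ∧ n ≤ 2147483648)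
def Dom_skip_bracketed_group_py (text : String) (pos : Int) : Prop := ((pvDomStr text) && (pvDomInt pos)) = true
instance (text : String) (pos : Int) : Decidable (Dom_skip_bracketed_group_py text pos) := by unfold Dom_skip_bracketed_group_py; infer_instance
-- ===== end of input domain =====

-- B replaces A's per-character scan with str.find jumps between the next '[' / ']' positions (more idiomatic; same depth bookkeeping, different traversal).

-- ===== PORT A =====
-- the while loop of A: depth/i exactly as in the Python (fuel = an upper bound on the
-- remaining iterations, always sufficient at the call site below)
def skipA_loop (cs : List Char) : Nat → Int → Int → Int
  | 0, _, i => i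
  | fuel + 1, depth, i =>
    if i < (cs.length : Int) ∧ depth ≠ 0 then
      skipA_loop cs fuel
        (if PySem.List.pyGet? cs i = some '[' then depth + 1
         else if PySem.List.pyGet? cs i = some ']' then depth - 1
         else depth)
        (i + 1)
    else i

def skip_bracketed_group_py (text : String) (pos : Int) : Int :=
  if pos ≥ (text.toList.length : Int) ∨ PySem.List.pyGet? text.toList pos ≠ some '[' then pos
  else skipA_loop text.toList (2 * text.toList.length + 2) 1 (pos + 1)

-- ===== PORT B =====
-- the while loop of B: jump from bracket to bracket with find (fuel as above)
def skipB_loop (cs : List Char) : Nat → Int → Int → Int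
  | 0, _, cur => cur
  | fuel + 1, depth, cur =>
    if depth = 0 then cur
    else if PySem.Chars.findFrom cs [']'] cur none = -1 then (cs.length : Int)
    else if PySem.Chars.findFrom cs ['['] cur none ≠ -1 ∧
        PySem.Chars.findFrom cs ['['] cur none < PySem.Chars.findFrom cs [']'] cur none then
      skipB_loop cs fuel (depth + 1) (PySem.Chars.findFrom cs ['['] cur none + 1)
    else
      skipB_loop cs fuel (depth - 1) (PySem.Chars.findFrom cs [']'] cur none + 1)

def skip_bracketed_group_py_alt (text : String) (pos : Int) : Int :=
  if pos ≥ (text.toList.length : Int) ∨ PySem.List.pyGet? text.toList pos ≠ some '[' then pos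
  else skipB_loop text.toList (2 * text.toList.length + 2) 1 (pos + 1)

-- ===== PRECONDITION & SPEC =====
-- Pre_ excludes pos < -len(text), where A raises IndexError, and negative pos that (after
-- Python's negative-index wraparound) points at '[', where A's scan from the negative index
-- pos+1 walks wrapped positions and its result (possibly a negative index) is an accident of
-- the implementation that no caller relies on; B jumps with str.find there and may differ.
def Pre_skip_bracketed_group_py (text : String) (pos : Int) : Prop :=
  -(text.toList.length : Int) ≤ pos ∧
    (pos < 0 → PySem.List.pyGet? text.toList pos ≠ some '[')
instance (text : String) (pos : Int) : Decidable (Pre_skip_bracketed_group_py text pos) := by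
  unfold Pre_skip_bracketed_group_py; infer_instance

def pvWitness_skip_bracketed_group_py : String × Int := ("[a[b]]c", 0)

def Spec_skip_bracketed_group_py (text : String) (pos : Int) (out : Int) : Prop := out = skip_bracketed_group_py_alt text pos
instance (text : String) (pos : Int) (out : Int) : Decidable (Spec_skip_bracketed_group_py text pos out) := by unfold Spec_skip_bracketed_group_py; infer_instance

-- ===== CLAIM (what is proved, stated in full; the proofs are below) =====
def Claim_equal_skip_bracketed_group_py : Prop := ∀ (text : String) (pos : Int), Dom_skip_bracketed_group_py text pos → Pre_skip_bracketed_group_py text pos → Spec_skip_bracketed_group_py text pos (skip_bracketed_group_py text pos)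

-- ===== LEMMAS AND PROOFS =====

theorem singleton_prefix_drop {s : List Char} {c : Char} {j : Nat} :
    [c] <+: s.drop j ↔ ∃ hj : j < s.length, s[j] = c := by
  constructor
  · intro h
    have hlen : 0 < (s.drop j).length := by
      rcases h with ⟨t, ht⟩; simp [← ht]
    have hj : j < s.length := by simpa using hlen
    refine ⟨hj, ?_⟩
    have := List.IsPrefix.getElem h (i := 0) (by simp)
    simpa [List.getElem_drop] using this.symm
  · rintro ⟨hj, hc⟩
    have : s.drop j = c :: s.drop (j+1) := by
      rw [List.drop_eq_getElem_cons hj, hc]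
    rw [this]
    exact ⟨s.drop (j+1), rfl⟩

-- bounds of a successful single-character find (needed for loopB's termination)
theorem findFrom_char_bounds (s : List Char) (c : Char) (start : Int)
    (h : PySem.Chars.findFrom s [c] start none ≠ -1) :
    start < PySem.Chars.findFrom s [c] start none + 1 ∧
      PySem.Chars.findFrom s [c] start none + 1 ≤ (s.length : Int) := by
  simp only [PySem.Chars.findFrom] at h ⊢
  set n : Int := (s.length : Int) with hn
  have hn0 : 0 ≤ n := hn ▸ Int.natCast_nonneg _
  set st : Int := (if start < 0 then if start + n < 0 then 0 else start + n else start) with hstdef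
  have h1 : start ≤ st ∧ 0 ≤ st := by rw [hstdef]; split_ifs <;> omega
  by_cases hlt : n < st
  · rw [if_pos hlt] at h; exact absurd rfl h
  · rw [if_neg hlt] at h ⊢
    set r : Int := PySem.Chars.find (List.drop st.toNat (List.take n.toNat s)) [c] with hrdef
    by_cases hre : r = -1
    · rw [if_pos hre] at h; exact absurd rfl h
    · rw [if_neg hre] at h ⊢
      have h0 : 0 ≤ r := by
        have := PySem.Chars.neg_one_le_find (List.drop st.toNat (List.take n.toNat s)) [c]
        omega
      have hs := PySem.Chars.find_spec (s := List.drop st.toNat (List.take n.toNat s)) (sub := [c]) h0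
      rcases singleton_prefix_drop.1 hs.1 with ⟨hj, -⟩
      simp only [List.length_drop, List.length_take] at hj
      constructor <;> omega

-- proof-side reference versions of the two loops (well-founded recursion, no fuel);
-- the ports compute them whenever the fuel is sufficient (skipA_fuel / skipB_fuel below)
def skipA_loopR (cs : List Char) (depth : Int) (i : Int) : Int :=
  if h : i < (cs.length : Int) ∧ depth ≠ 0 then
    let d' : Int :=
      if PySem.List.pyGet? cs i = some '[' then depth + 1
      else if PySem.List.pyGet? cs i = some ']' then depth - 1
      else depth
    skipA_loopR cs d' (i + 1)
  else i
termination_by ((cs.length : Int) - i).toNat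
decreasing_by omega

def skipB_loopR (cs : List Char) (depth : Int) (cur : Int) : Int :=
  if depth = 0 then cur
  else
    if hclose : PySem.Chars.findFrom cs [']'] cur none = -1 then (cs.length : Int)
    else
      if hop : PySem.Chars.findFrom cs ['['] cur none ≠ -1 ∧
          PySem.Chars.findFrom cs ['['] cur none < PySem.Chars.findFrom cs [']'] cur none then
        skipB_loopR cs (depth + 1) (PySem.Chars.findFrom cs ['['] cur none + 1)
      else
        skipB_loopR cs (depth - 1) (PySem.Chars.findFrom cs [']'] cur none + 1)
termination_by ((cs.length : Int) + 1 - cur).toNat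
decreasing_by
  · have h1 := findFrom_char_bounds cs '[' cur hop.1
    have h2 := findFrom_char_bounds cs ']' cur hclose
    omega
  · have h2 := findFrom_char_bounds cs ']' cur hclose
    omega


theorem skipA_fuel (cs : List Char) :
    ∀ (f : Nat) (d i : Int), ((cs.length : Int) - i).toNat ≤ f →
      skipA_loop cs f d i = skipA_loopR cs d i := by
  intro f
  induction f with
  | zero =>
    intro d i hf
    rw [skipA_loop, skipA_loopR, dif_neg (by omega)]
  | succ f ih =>
    intro d i hf
    rw [skipA_loop, skipA_loopR]
    by_cases hg : i < (cs.length : Int) ∧ d ≠ 0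
    · rw [if_pos hg, dif_pos hg]
      exact ih _ (i + 1) (by omega)
    · rw [if_neg hg, dif_neg hg]

theorem skipB_fuel (cs : List Char) :
    ∀ (f : Nat) (d cur : Int), ((cs.length : Int) + 1 - cur).toNat < f →
      skipB_loop cs f d cur = skipB_loopR cs d cur := by
  intro f
  induction f with
  | zero =>
    intro d cur hf
    omega
  | succ f ih =>
    intro d cur hf
    rw [skipB_loop, skipB_loopR]
    by_cases hd : d = 0
    · rw [if_pos hd, if_pos hd]
    rw [if_neg hd, if_neg hd]
    by_cases hclose : PySem.Chars.findFrom cs [']'] cur none = -1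
    · rw [if_pos hclose, dif_pos hclose]
    rw [if_neg hclose, dif_neg hclose]
    have hcb := findFrom_char_bounds cs ']' cur hclose
    by_cases hop : PySem.Chars.findFrom cs ['['] cur none ≠ -1 ∧
        PySem.Chars.findFrom cs ['['] cur none < PySem.Chars.findFrom cs [']'] cur none
    · rw [if_pos hop, dif_pos hop]
      have hob := findFrom_char_bounds cs '[' cur hop.1
      exact ih _ _ (by omega)
    · rw [if_neg hop, dif_neg hop]
      exact ih _ _ (by omega)


-- characterization of findFrom = -1 for a single character
theorem ff_none_iff (s : List Char) (c : Char) (k : Nat) (hk : k ≤ s.length) :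
    PySem.Chars.findFrom s [c] (k : Int) none = -1 ↔
      ∀ j : Nat, k ≤ j → ∀ hj : j < s.length, s[j] ≠ c := by
  rw [PySem.Chars.findFrom_natCast_eq_neg_one_iff s [c] k hk]
  constructor
  · intro h j hkj hj hc
    apply h
    obtain ⟨i, rfl⟩ : ∃ i, j = k + i := ⟨j - k, by omega⟩
    have hmem : c ∈ s.drop k := by
      have hi : i < (s.drop k).length := by simp; omega
      have hg : (s.drop k)[i] = c := by rw [List.getElem_drop]; exact hc
      exact hg ▸ List.getElem_mem hi
    rcases List.append_of_mem hmem with ⟨l1, l2, hl⟩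
    exact ⟨l1, l2, by rw [hl]; simp⟩
  · intro h hinf
    rcases hinf with ⟨t₁, t₂, ht⟩
    have hmem : c ∈ s.drop k := by rw [← ht]; simp
    rcases List.getElem_of_mem hmem with ⟨i, hi, hci⟩
    have hi' : k + i < s.length := by simp at hi; omega
    rw [List.getElem_drop] at hci
    exact h (k + i) (by omega) hi' hci

-- characterization of a successful single-character find
theorem ff_some_spec (s : List Char) (c : Char) (k : Nat) (hk : k ≤ s.length)
    (h : PySem.Chars.findFrom s [c] (k : Int) none ≠ -1) :
    ∃ m : Nat, PySem.Chars.findFrom s [c] (k : Int) none = (m : Int) ∧ k ≤ m ∧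
      (∃ hm : m < s.length, s[m] = c) ∧
      ∀ i : Nat, k ≤ i → i < m → ∀ hi : i < s.length, s[i] ≠ c := by
  have hs := PySem.Chars.findFrom_natCast_spec s [c] k hk h
  have h0 : (0 : Int) ≤ PySem.Chars.findFrom s [c] (k : Int) none :=
    le_trans (Int.natCast_nonneg k) hs.1
  refine ⟨(PySem.Chars.findFrom s [c] (k : Int) none).toNat, by omega, by omega, ?_, ?_⟩
  · exact singleton_prefix_drop.1 hs.2.1
  · intro i hki him hi hc
    exact hs.2.2 i hki him (singleton_prefix_drop.2 ⟨hi, hc⟩)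

theorem skipA_stop (cs : List Char) (d : Int) (i : Int)
    (h : ¬(i < (cs.length : Int) ∧ d ≠ 0)) : skipA_loopR cs d i = i := by
  rw [skipA_loopR, dif_neg h]

theorem skipA_step (cs : List Char) (d : Int) (j : Nat) (hj : j < cs.length) (hd : d ≠ 0) :
    skipA_loopR cs d (j : Int) =
      skipA_loopR cs (if cs[j] = '[' then d + 1 else if cs[j] = ']' then d - 1 else d)
        ((j : Int) + 1) := by
  rw [skipA_loopR, dif_pos ⟨by exact_mod_cast hj, hd⟩]
  simp [PySem.List.pyGet?_natCast, List.getElem?_eq_getElem hj]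

-- A's scan does not change depth while it crosses a bracket-free stretch
theorem skipA_skip (cs : List Char) (j1 j2 : Nat) (h12 : j1 ≤ j2) (h2 : j2 ≤ cs.length)
    (hnb : ∀ i : Nat, j1 ≤ i → i < j2 → ∀ hi : i < cs.length, cs[i] ≠ '[' ∧ cs[i] ≠ ']')
    (d : Int) (hd : d ≠ 0) :
    skipA_loopR cs d (j1 : Int) = skipA_loopR cs d (j2 : Int) := by
  obtain ⟨N, hN⟩ : ∃ N, j2 - j1 = N := ⟨_, rfl⟩
  induction N generalizing j1 with
  | zero =>
    have : j1 = j2 := by omega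
    rw [this]
  | succ N ih =>
    have hj1 : j1 < cs.length := by omega
    have hb := hnb j1 le_rfl (by omega) hj1
    rw [skipA_step cs d j1 hj1 hd, if_neg hb.1, if_neg hb.2]
    have hcast : (j1 : Int) + 1 = ((j1 + 1 : Nat) : Int) := by push_cast; ring
    rw [hcast]
    exact ih (j1 + 1) (by omega) (fun i h1 h2 hi => hnb i (by omega) h2 hi) (by omega)

-- with no ']' ahead and positive depth, A's scan runs to the end of the string
theorem skipA_to_end (cs : List Char) (d : Int) (hd : 1 ≤ d) (j : Nat) (hj : j ≤ cs.length)
    (hnc : ∀ i : Nat, j ≤ i → ∀ hi : i < cs.length, cs[i] ≠ ']') :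
    skipA_loopR cs d (j : Int) = (cs.length : Int) := by
  obtain ⟨N, hN⟩ : ∃ N, cs.length - j = N := ⟨_, rfl⟩
  induction N generalizing j d with
  | zero =>
    have hjl : j = cs.length := by omega
    rw [skipA_stop cs d _ (by push_cast [hjl]; omega), hjl]
  | succ N ih =>
    have hjl : j < cs.length := by omega
    rw [skipA_step cs d j hjl (by omega), if_neg (hnc j le_rfl hjl)]
    have hcast : (j : Int) + 1 = ((j + 1 : Nat) : Int) := by push_cast; ring
    rw [hcast]
    by_cases hob : cs[j] = '['
    · rw [if_pos hob]
      exact ih (d + 1) (by omega) (j + 1) (by omega) (fun i h1 hi => hnc i (by omega) hi) (by omega)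
    · rw [if_neg hob]
      exact ih d hd (j + 1) (by omega) (fun i h1 hi => hnc i (by omega) hi) (by omega)

theorem skipB_stop_zero (cs : List Char) (cur : Int) : skipB_loopR cs 0 cur = cur := by
  rw [skipB_loopR, if_pos rfl]

-- both loops agree once the cursor has reached the end of the string
theorem loops_eq_at_len (cs : List Char) (d : Int) :
    skipA_loopR cs d (cs.length : Int) = skipB_loopR cs d (cs.length : Int) := by
  by_cases hd : d = 0
  · rw [hd, skipB_stop_zero, skipA_stop cs 0 _ (by omega)]
  · have hclose : PySem.Chars.findFrom cs [']'] (cs.length : Int) none = -1 :=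
      (ff_none_iff cs ']' cs.length le_rfl).2 (fun j hj hj2 => by omega)
    rw [skipB_loopR, if_neg hd, dif_pos hclose, skipA_stop cs d _ (by omega)]

-- the heart of the proof: A's character scan equals B's find-jumping loop
theorem loops_eq (cs : List Char) (N : Nat) :
    ∀ j : Nat, ∀ d : Int, cs.length - j ≤ N → j ≤ cs.length → 0 ≤ d →
      skipA_loopR cs d (j : Int) = skipB_loopR cs d (j : Int) := by
  induction N with
  | zero =>
    intro j d hN hj _
    have : j = cs.length := by omega
    rw [this]; exact loops_eq_at_len cs d
  | succ N ih =>
    intro j d hN hj hd0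
    by_cases hjl : j = cs.length
    · rw [hjl]; exact loops_eq_at_len cs d
    have hjlt : j < cs.length := by omega
    by_cases hd : d = 0
    · rw [hd, skipB_stop_zero, skipA_stop cs 0 _ (by omega)]
    have hd1 : 1 ≤ d := by omega
    rw [skipB_loopR, if_neg hd]
    by_cases hclose : PySem.Chars.findFrom cs [']'] (j : Int) none = -1
    · rw [dif_pos hclose]
      exact skipA_to_end cs d hd1 j (by omega)
        (fun i h1 hi => (ff_none_iff cs ']' j (by omega)).1 hclose i h1 hi)
    · rw [dif_neg hclose]
      obtain ⟨jc, hceq, hkjc, ⟨hjc, hcc⟩, hcmin⟩ := ff_some_spec cs ']' j (by omega) hclose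
      by_cases hop : PySem.Chars.findFrom cs ['['] (j : Int) none ≠ -1 ∧
          PySem.Chars.findFrom cs ['['] (j : Int) none < PySem.Chars.findFrom cs [']'] (j : Int) none
      · rw [dif_pos hop]
        obtain ⟨jo, hoeq, hkjo, ⟨hjo, hoc⟩, homin⟩ := ff_some_spec cs '[' j (by omega) hop.1
        have hjojc : jo < jc := by
          have := hop.2; rw [hoeq, hceq] at this; exact_mod_cast this
        have hA : skipA_loopR cs d (j : Int) = skipA_loopR cs d (jo : Int) :=
          skipA_skip cs j jo hkjo (by omega)
            (fun i h1 h2 hi => ⟨homin i h1 h2 hi, hcmin i h1 (by omega) hi⟩) d hd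
        rw [hA, skipA_step cs d jo hjo hd, if_pos hoc, hoeq]
        have hcast : (jo : Int) + 1 = ((jo + 1 : Nat) : Int) := by push_cast; ring
        rw [hcast]
        exact ih (jo + 1) (d + 1) (by omega) (by omega) (by omega)
      · rw [dif_neg hop]
        have hnoop : ∀ i : Nat, j ≤ i → i < jc → ∀ hi : i < cs.length, cs[i] ≠ '[' := by
          intro i h1 h2 hi
          by_cases hofound : PySem.Chars.findFrom cs ['['] (j : Int) none = -1
          · exact (ff_none_iff cs '[' j (by omega)).1 hofound i h1 hi
          · obtain ⟨jo, hoeq, hkjo, _, homin⟩ := ff_some_spec cs '[' j (by omega) hofound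
            have hjcjo : jc ≤ jo := by
              by_contra hlt
              exact hop ⟨hofound, by rw [hoeq, hceq]; exact_mod_cast (by omega : jo < jc)⟩
            exact homin i h1 (by omega) hi
        have hA : skipA_loopR cs d (j : Int) = skipA_loopR cs d (jc : Int) :=
          skipA_skip cs j jc hkjc (by omega)
            (fun i h1 h2 hi => ⟨hnoop i h1 h2 hi, hcmin i h1 h2 hi⟩) d hd
        have hne : cs[jc] ≠ '[' := by rw [hcc]; decide
        rw [hA, skipA_step cs d jc hjc hd, if_neg hne, if_pos hcc, hceq]
        have hcast : (jc : Int) + 1 = ((jc + 1 : Nat) : Int) := by push_cast; ring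
        rw [hcast]
        exact ih (jc + 1) (d - 1) (by omega) (by omega) (by omega)

-- ===== VERDICT (by name: the statement is the Claim_ definition above) =====
theorem skip_bracketed_group_py_spec : Claim_equal_skip_bracketed_group_py := by
  intro text pos _ hpre
  unfold Spec_skip_bracketed_group_py skip_bracketed_group_py skip_bracketed_group_py_alt
  by_cases hg : pos ≥ (text.toList.length : Int) ∨ PySem.List.pyGet? text.toList pos ≠ some '['
  · rw [if_pos hg, if_pos hg]
  · rw [if_neg hg, if_neg hg]
    push Not at hg
    have hpos0 : 0 ≤ pos := by
      by_contra hneg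
      exact hpre.2 (by omega) hg.2
    obtain ⟨j, rfl⟩ : ∃ j : Nat, pos = (j : Int) := ⟨pos.toNat, by omega⟩
    have hcast : (j : Int) + 1 = ((j + 1 : Nat) : Int) := by push_cast; ring
    rw [hcast]
    have hjlen : j < text.toList.length := by exact_mod_cast hg.1
    rw [skipA_fuel text.toList _ 1 _ (by omega), skipB_fuel text.toList _ 1 _ (by omega)]
    exact loops_eq text.toList text.toList.length (j + 1) 1 (by omega) (by omega) (by omega)
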